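-- pv_equiv track=rewrite | github.com/nguyentanphivu/sheet-music-scanner | Assignment3_Test2405/utils.py | linesClustering
-- ===== SOURCE A (Python) =====
-- def linesClustering(trimmedRowsWithLine, minGap = 50):
--     clusterLst = []
--
--     cluster = []
--     cluster.append(trimmedRowsWithLine[0])
--     for i in range(1, len(trimmedRowsWithLine)):
--
--         if ((trimmedRowsWithLine[i] - trimmedRowsWithLine[i - 1]) > minGap):
--             clusterLst.append(cluster)
--             cluster = []
--             cluster.append(trimmedRowsWithLine[i])
--
--         else:
--             cluster.append(trimmedRowsWithLine[i])
--     clusterLst.append(cluster)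
--
--     return clusterLst
-- ===== SOURCE B (Python) =====
-- def linesClustering(trimmedRowsWithLine, minGap=50):
--     n = len(trimmedRowsWithLine)
--     splits = [i for i in range(1, n)
--               if trimmedRowsWithLine[i] - trimmedRowsWithLine[i - 1] > minGap]
--     bounds = [0] + splits + [n]
--     return [trimmedRowsWithLine[a:b] for a, b in zip(bounds, bounds[1:])]
-- ===== Notes on version B (the rewrite author's own statement) =====
-- stated objective: alternative
-- what changed: B first collects the split indices where the gap exceeds minGap, then materialises each cluster by slicing between consecutive boundaries, instead of growing and flushing a running cluster through a single stateful loop.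
-- outside the precondition, e.g. on linesClustering([], 50): A raises IndexError, B returns [[]]
import Mathlib
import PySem

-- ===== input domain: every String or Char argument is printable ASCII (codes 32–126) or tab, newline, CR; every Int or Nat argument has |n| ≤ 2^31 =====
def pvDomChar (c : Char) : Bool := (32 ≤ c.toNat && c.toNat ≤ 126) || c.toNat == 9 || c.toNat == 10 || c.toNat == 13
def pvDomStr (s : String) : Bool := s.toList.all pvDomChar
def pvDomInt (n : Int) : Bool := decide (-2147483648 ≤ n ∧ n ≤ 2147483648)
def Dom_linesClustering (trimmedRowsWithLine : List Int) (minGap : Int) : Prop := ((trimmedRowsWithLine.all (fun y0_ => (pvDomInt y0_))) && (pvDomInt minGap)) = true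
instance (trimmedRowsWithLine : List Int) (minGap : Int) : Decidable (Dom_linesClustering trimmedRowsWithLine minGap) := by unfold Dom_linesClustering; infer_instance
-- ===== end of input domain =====

-- B builds the cluster boundaries first (split indices by gap) and materialises groups as
-- slices between consecutive boundaries, instead of A's single stateful grow-and-flush loop.

-- ===== PORT A =====
-- literal port of A: running cluster started with lst[0] (Pre_ excludes the empty list,
-- where that indexing raises IndexError), then one pass flushing on large gaps.
def linesClustering (trimmedRowsWithLine : List Int) (minGap : Int) : List (List Int) :=
  let cluster : List Int := [PySem.List.pyGetD trimmedRowsWithLine 0 0]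
  let st := (PySem.List.pyRange 1 (trimmedRowsWithLine.length : Int) 1).foldl
    (fun (st : List (List Int) × List Int) i =>
      if PySem.List.pyGetD trimmedRowsWithLine i 0
           - PySem.List.pyGetD trimmedRowsWithLine (i - 1) 0 > minGap then
        (st.1 ++ [st.2], [PySem.List.pyGetD trimmedRowsWithLine i 0])
      else
        (st.1, st.2 ++ [PySem.List.pyGetD trimmedRowsWithLine i 0]))
    ([], cluster)
  st.1 ++ [st.2]

-- ===== PORT B =====
def linesClustering_alt (trimmedRowsWithLine : List Int) (minGap : Int) : List (List Int) :=
  let n : Int := trimmedRowsWithLine.length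
  let splits := (PySem.List.pyRange 1 n 1).filter
    (fun i => PySem.List.pyGetD trimmedRowsWithLine i 0
                - PySem.List.pyGetD trimmedRowsWithLine (i - 1) 0 > minGap)
  let bounds := 0 :: (splits ++ [n])
  (bounds.zip bounds.tail).map
    (fun p => PySem.List.slice trimmedRowsWithLine (some p.1) (some p.2))

-- ===== PRECONDITION & SPEC =====
-- Pre_ excludes only the empty list, where A's 'trimmedRowsWithLine[0]' raises IndexError.
def Pre_linesClustering (trimmedRowsWithLine : List Int) (minGap : Int) : Prop :=
  trimmedRowsWithLine ≠ []
instance (trimmedRowsWithLine : List Int) (minGap : Int) : Decidable (Pre_linesClustering trimmedRowsWithLine minGap) := by unfold Pre_linesClustering; infer_instance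
def pvWitness_linesClustering : List Int × Int := ([0, 10, 100], 50)

def Spec_linesClustering (trimmedRowsWithLine : List Int) (minGap : Int) (out : List (List Int)) : Prop := out = linesClustering_alt trimmedRowsWithLine minGap
instance (trimmedRowsWithLine : List Int) (minGap : Int) (out : List (List Int)) : Decidable (Spec_linesClustering trimmedRowsWithLine minGap out) := by unfold Spec_linesClustering; infer_instance

-- ===== CLAIM (what is proved, stated in full; the proofs are below) =====
def Claim_equal_linesClustering : Prop := ∀ (trimmedRowsWithLine : List Int) (minGap : Int), Dom_linesClustering trimmedRowsWithLine minGap → Pre_linesClustering trimmedRowsWithLine minGap → Spec_linesClustering trimmedRowsWithLine minGap (linesClustering trimmedRowsWithLine minGap)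

-- ===== LEMMAS AND PROOFS =====

-- A's loop body and the shared data, named for the proofs
def pvStep (lst : List Int) (minGap : Int) :
    List (List Int) × List Int → Int → List (List Int) × List Int :=
  fun st i =>
    if PySem.List.pyGetD lst i 0 - PySem.List.pyGetD lst (i - 1) 0 > minGap then
      (st.1 ++ [st.2], [PySem.List.pyGetD lst i 0])
    else
      (st.1, st.2 ++ [PySem.List.pyGetD lst i 0])

def pvSt (lst : List Int) (minGap : Int) (n : Nat) : List (List Int) × List Int :=
  (PySem.List.pyRange 1 (n : Int) 1).foldl (pvStep lst minGap)
    ([], [PySem.List.pyGetD lst 0 0])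

def pvSp (lst : List Int) (minGap : Int) (n : Nat) : List Int :=
  (PySem.List.pyRange 1 (n : Int) 1).filter
    (fun i => PySem.List.pyGetD lst i 0 - PySem.List.pyGetD lst (i - 1) 0 > minGap)

-- slices between consecutive boundaries
def pvPairsMap (lst : List Int) (b : List Int) : List (List Int) :=
  (b.zip b.tail).map (fun p => PySem.List.slice lst (some p.1) (some p.2))

theorem pvPairsMap_append_last (lst : List Int) (b : List Int) (m a : Int)
    (h : b.getLast? = some a) :
    pvPairsMap lst (b ++ [m])
      = pvPairsMap lst b ++ [PySem.List.slice lst (some a) (some m)] := by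
  induction b with
  | nil => simp at h
  | cons x t ih =>
    cases t with
    | nil => simp_all [pvPairsMap]
    | cons y u =>
      have h' : (y :: u).getLast? = some a := by
        simpa [List.getLast?_cons_cons] using h
      have := ih h'
      simp only [pvPairsMap, List.cons_append, List.tail_cons, List.zip_cons_cons,
        List.map_cons] at this ⊢
      simpa using this

theorem pvTake_one (lst : List Int) (k : Nat) (hk : k < lst.length) :
    (lst.drop k).take 1 = [lst[k]] := by
  rw [List.drop_eq_getElem_cons hk]
  rfl

theorem linesClustering_invariant (lst : List Int) (minGap : Int)
    (n : Nat) (h1 : 1 ≤ n) (hn : n ≤ lst.length) :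
    ∃ s : Nat, s < n ∧
      (0 :: pvSp lst minGap n).getLast? = some (s : Int) ∧
      (pvSt lst minGap n).1 = pvPairsMap lst (0 :: pvSp lst minGap n) ∧
      (pvSt lst minGap n).2 = PySem.List.slice lst (some (s : Int)) (some (n : Int)) := by
  induction n with
  | zero => omega
  | succ k ih =>
    by_cases hk : k = 0
    · subst hk
      have hr : PySem.List.pyRange 1 ((1 : Nat) : Int) 1 = [] :=
        PySem.List.pyRange_one_eq_nil (by norm_num)
      refine ⟨0, by omega, ?_, ?_, ?_⟩
      · simp [pvSp]
      · simp [pvSt, pvSp, pvPairsMap]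
      · simp only [pvSt, Nat.zero_add, hr, List.foldl_nil]
        rw [show ((1:Nat):Int) = ((0:Nat):Int) + ((1:Nat):Int) by norm_num,
          PySem.List.slice_natCast_add]
        cases lst with
        | nil => simp at hn
        | cons x t => simp [PySem.List.pyGetD_zero_cons]
    · have hk1 : 1 ≤ k := by omega
      have hklt : k < lst.length := by omega
      obtain ⟨s, hs, hlast, hfst, hsnd⟩ := ih (by omega) (by omega)
      have hcast : (((k + 1 : Nat)) : Int) = (k : Int) + 1 := by push_cast; ring
      have hr : PySem.List.pyRange 1 ((k : Int) + 1) 1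
          = PySem.List.pyRange 1 (k : Int) 1 ++ [(k : Int)] :=
        PySem.List.pyRange_one_succ_right (by exact_mod_cast hk1)
      have hgetk : PySem.List.pyGetD lst ((k : Nat) : Int) 0 = lst[k] := by
        rw [PySem.List.pyGetD_natCast]
        simp [List.getD_eq_getElem?_getD, List.getElem?_eq_getElem hklt]
      have hstS : pvSt lst minGap (k + 1) = pvStep lst minGap (pvSt lst minGap k) (k : Int) := by
        unfold pvSt
        rw [hcast, hr, List.foldl_append, List.foldl_cons, List.foldl_nil]
      by_cases hp : lst[k] - PySem.List.pyGetD lst ((k : Int) - 1) 0 > minGap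
      · -- gap at index k: A flushes the running cluster; B records k as a boundary
        have hspS : pvSp lst minGap (k + 1) = pvSp lst minGap k ++ [(k : Int)] := by
          unfold pvSp
          rw [hcast, hr, List.filter_append]
          simp [List.getElem?_eq_getElem hklt, hp]
        refine ⟨k, by omega, ?_, ?_, ?_⟩
        · rw [hspS, show (0 :: (pvSp lst minGap k ++ [(k : Int)]))
              = (0 :: pvSp lst minGap k) ++ [(k : Int)] from rfl]
          exact List.getLast?_concat
        · rw [hstS, hspS]
          simp only [pvStep]
          rw [hgetk, if_pos hp]
          show (pvSt lst minGap k).1 ++ [(pvSt lst minGap k).2] = _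
          rw [show (0 :: (pvSp lst minGap k ++ [(k : Int)]))
              = (0 :: pvSp lst minGap k) ++ [(k : Int)] from rfl,
            pvPairsMap_append_last lst _ _ _ hlast, hfst, hsnd]
        · rw [hstS]
          simp only [pvStep]
          rw [hgetk, if_pos hp]
          show [lst[k]] = _
          rw [show (((k + 1 : Nat)) : Int) = ((k : Nat) : Int) + ((1 : Nat) : Int) by push_cast; ring,
            PySem.List.slice_natCast_add, pvTake_one lst k hklt]
      · -- no gap at index k: A extends the running cluster; B keeps the same boundaries
        have hspS : pvSp lst minGap (k + 1) = pvSp lst minGap k := by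
          unfold pvSp
          rw [hcast, hr, List.filter_append]
          simp [List.getElem?_eq_getElem hklt, hp]
        refine ⟨s, by omega, ?_, ?_, ?_⟩
        · rw [hspS]; exact hlast
        · rw [hstS, hspS]
          simp only [pvStep]
          rw [hgetk, if_neg hp]
          exact hfst
        · rw [hstS]
          simp only [pvStep]
          rw [hgetk, if_neg hp]
          show (pvSt lst minGap k).2 ++ [lst[k]] = _
          rw [hsnd, PySem.List.slice_natCast, PySem.List.slice_natCast,
            show (k + 1 : Nat) - s = (k - s) + 1 by omega, List.take_add_one]
          congr 1
          rw [List.getElem?_drop, show s + (k - s) = k by omega,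
            List.getElem?_eq_getElem hklt]
          rfl

-- ===== VERDICT (by name: the statement is the Claim_ definition above) =====
theorem linesClustering_spec : Claim_equal_linesClustering := by
  intro lst minGap _hdom hpre
  have hlen : 1 ≤ lst.length := List.length_pos_of_ne_nil hpre
  obtain ⟨s, _hs, hlast, hfst, hsnd⟩ :=
    linesClustering_invariant lst minGap lst.length hlen le_rfl
  show linesClustering lst minGap = linesClustering_alt lst minGap
  have hA : linesClustering lst minGap
      = (pvSt lst minGap lst.length).1 ++ [(pvSt lst minGap lst.length).2] := rfl
  have hB : linesClustering_alt lst minGap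
      = pvPairsMap lst ((0 :: pvSp lst minGap lst.length) ++ [(lst.length : Int)]) := rfl
  rw [hA, hB, pvPairsMap_append_last lst _ _ _ hlast, hfst, hsnd]
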